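-- pv_equiv track=rewrite | github.com/Pawelooo/Bulls-and-Cows | Projekt_1.py | wylicz_byki
-- ===== SOURCE A (Python) =====
-- def wylicz_byki(wartosci_prawidłowe, wartosci_uzytkownika, indeksy_zajeta):
--     Bulls = 0
--     indeksy_zajete_byki = indeksy_zajeta.copy()
--     for i, wartosc in enumerate(wartosci_prawidłowe):
--         if not i in indeksy_zajeta:
--             for j, liczba in enumerate(wartosci_uzytkownika):
--                 if i != j and liczba == wartosc and j not in indeksy_zajete_byki:
--                     Bulls += 1
--                     indeksy_zajeta.append(i)
--                     indeksy_zajete_byki.append(j)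
--                     break
--     return Bulls
-- ===== SOURCE B (Python) =====
-- def wylicz_byki(wartosci_prawidłowe, wartosci_uzytkownika, indeksy_zajeta):
--     zajete = set(indeksy_zajeta)
--     pools = {}
--     for j, x in enumerate(wartosci_uzytkownika):
--         if j not in zajete:
--             pools.setdefault(x, []).append(j)
--     bulls = 0
--     for i, v in enumerate(wartosci_prawidłowe):
--         if i in zajete:
--             continue
--         d = pools.get(v)
--         if not d:
--             continue
--         if d[0] != i:
--             d.pop(0)
--         elif len(d) > 1:
--             d.pop(1)
--         else:
--             continue
--         bulls += 1
--         indeksy_zajeta.append(i)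
--     return bulls
-- ===== Notes on version B (the rewrite author's own statement) =====
-- stated objective: faster
-- what changed: Replaces A's inner scan over all of wartosci_uzytkownika with list-membership tests by per-value index pools built once in a dict plus a hash set of taken indices, so each guess position pops its smallest available matching index (skipping its own position) in O(1) dict work.
import Mathlib
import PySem

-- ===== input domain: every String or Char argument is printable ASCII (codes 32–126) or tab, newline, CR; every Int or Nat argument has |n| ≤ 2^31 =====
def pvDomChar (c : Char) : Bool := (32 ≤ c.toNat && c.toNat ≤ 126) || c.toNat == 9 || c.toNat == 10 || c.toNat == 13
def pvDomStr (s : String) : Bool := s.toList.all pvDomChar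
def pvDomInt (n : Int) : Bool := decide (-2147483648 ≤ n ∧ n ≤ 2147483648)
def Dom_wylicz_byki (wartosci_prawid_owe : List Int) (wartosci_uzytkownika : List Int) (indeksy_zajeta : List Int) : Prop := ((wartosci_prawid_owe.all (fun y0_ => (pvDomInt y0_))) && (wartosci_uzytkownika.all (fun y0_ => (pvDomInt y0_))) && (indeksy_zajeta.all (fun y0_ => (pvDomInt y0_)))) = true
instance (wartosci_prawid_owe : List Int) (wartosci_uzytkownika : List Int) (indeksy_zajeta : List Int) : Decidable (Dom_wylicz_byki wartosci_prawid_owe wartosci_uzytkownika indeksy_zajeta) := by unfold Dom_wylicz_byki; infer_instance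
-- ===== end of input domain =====

-- B replaces A's inner scan + list-membership tests by per-value index pools (a dict built once)
-- and a set of taken indices: faster. Both Pythons mutate indeksy_zajeta identically (append each
-- matched position); the equivalence proved here is about the RETURN value.

-- ===== PORT A =====
-- inner 'for j, liczba in enumerate(wartosci_uzytkownika): … break' — first j that fits, if any
def wbFindA (i : Int) (wartosc : Int) (byki : List Int) : List (Int × Int) → Option Int
  | [] => none
  | (j, liczba) :: rest =>
      if i ≠ j ∧ liczba = wartosc ∧ j ∉ byki then some j
      else wbFindA i wartosc byki rest

-- one outer iteration of A: state = (Bulls, indeksy_zajeta, indeksy_zajete_byki)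
def wbStepA (u : List Int) (st : Int × List Int × List Int) (p : Int × Int) : Int × List Int × List Int :=
  if p.1 ∈ st.2.1 then st
  else
    match wbFindA p.1 p.2 st.2.2 (PySem.List.enumerate u 0) with
    | some j => (st.1 + 1, st.2.1 ++ [p.1], st.2.2 ++ [j])
    | none => st

def wylicz_byki (wartosci_prawid_owe : List Int) (wartosci_uzytkownika : List Int) (indeksy_zajeta : List Int) : Int :=
  ((PySem.List.enumerate wartosci_prawid_owe 0).foldl (wbStepA wartosci_uzytkownika)
    (0, indeksy_zajeta, indeksy_zajeta)).1

-- ===== PORT B =====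
-- 'pools.setdefault(x, []).append(j)' for each free j
def wbPools (u : List Int) (zajete : PySem.Set Int) : PySem.Dict Int (List Int) :=
  (PySem.List.enumerate u 0).foldl
    (fun d p => if p.1 ∈ zajete then d else d.modify p.2 [] (· ++ [p.1])) PySem.Dict.empty

-- one outer iteration of B: state = (bulls, pools); d.pop(0) / d.pop(1) on the pool of v
def wbStepB (zajete : PySem.Set Int) (st : Int × PySem.Dict Int (List Int)) (p : Int × Int) :
    Int × PySem.Dict Int (List Int) :=
  if p.1 ∈ zajete then st
  else
    match st.2.getD p.2 [] with
    | [] => st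
    | j :: rest =>
        if j ≠ p.1 then (st.1 + 1, st.2.insert p.2 rest)
        else
          match rest with
          | [] => st
          | _ :: rest2 => (st.1 + 1, st.2.insert p.2 (j :: rest2))

def wylicz_byki_alt (wartosci_prawid_owe : List Int) (wartosci_uzytkownika : List Int) (indeksy_zajeta : List Int) : Int :=
  let zajete : PySem.Set Int := PySem.Set.ofList indeksy_zajeta
  ((PySem.List.enumerate wartosci_prawid_owe 0).foldl (wbStepB zajete)
    (0, wbPools wartosci_uzytkownika zajete)).1

-- ===== PRECONDITION & SPEC =====
def Spec_wylicz_byki (wartosci_prawid_owe : List Int) (wartosci_uzytkownika : List Int) (indeksy_zajeta : List Int) (out : Int) : Prop := out = wylicz_byki_alt wartosci_prawid_owe wartosci_uzytkownika indeksy_zajeta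
instance (wartosci_prawid_owe : List Int) (wartosci_uzytkownika : List Int) (indeksy_zajeta : List Int) (out : Int) : Decidable (Spec_wylicz_byki wartosci_prawid_owe wartosci_uzytkownika indeksy_zajeta out) := by unfold Spec_wylicz_byki; infer_instance

-- ===== CLAIM (what is proved, stated in full; the proofs are below) =====
def Claim_equal_wylicz_byki : Prop := ∀ (wartosci_prawid_owe : List Int) (wartosci_uzytkownika : List Int) (indeksy_zajeta : List Int), Dom_wylicz_byki wartosci_prawid_owe wartosci_uzytkownika indeksy_zajeta → Spec_wylicz_byki wartosci_prawid_owe wartosci_uzytkownika indeksy_zajeta (wylicz_byki wartosci_prawid_owe wartosci_uzytkownika indeksy_zajeta)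

-- ===== LEMMAS AND PROOFS =====

-- the free user-indices that currently hold value v, in increasing order
def wbAvail (u : List Int) (byki : List Int) (v : Int) : List Int :=
  ((PySem.List.enumerate u 0).filter (fun p => p.2 == v && decide (p.1 ∉ byki))).map Prod.fst

theorem wbFindA_eq_find? (i v : Int) (byki : List Int) (l : List (Int × Int)) :
    wbFindA i v byki l
      = ((l.filter (fun p => p.2 == v && decide (p.1 ∉ byki))).map Prod.fst).find?
          (fun j => decide (j ≠ i)) := by
  rw [List.find?_map, List.find?_filter]
  induction l with
  | nil => rfl
  | cons p rest ih =>
      obtain ⟨j, x⟩ := p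
      rw [wbFindA, List.find?_cons]
      by_cases h1 : x = v <;> by_cases h2 : j ∈ byki <;> by_cases h3 : j = i
      all_goals
        first
        | (rw [if_pos (by exact ⟨Ne.symm h3, h1, h2⟩)]; simp [h1, h2, h3])
        | (rw [if_neg (by rintro ⟨a, b, c⟩; first | exact absurd b h1 | exact c h2 | exact a h3.symm)]
           ; simp [h1, h2, h3, ih])

theorem wbAvail_nodup (u byki : List Int) (v : Int) : (wbAvail u byki v).Nodup := by
  have h := PySem.List.pairwise_lt_enumerate u (0 : Int)
  have h2 : ((PySem.List.enumerate u 0).filter (fun p => p.2 == v && decide (p.1 ∉ byki))).Pairwise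
      (fun p q => p.1 < q.1) := h.sublist List.filter_sublist
  have h3 := h2.map (f := Prod.fst) (fun a b hab => hab)
  exact h3.imp (fun hab => ne_of_lt hab)

theorem wbAvail_val (u byki : List Int) (v : Int) (j : Int) (h : j ∈ wbAvail u byki v) :
    ∃ (k : Nat) (hk : k < u.length), j = (k : Int) ∧ u[k] = v := by
  simp only [wbAvail, List.mem_map, List.mem_filter] at h
  obtain ⟨p, ⟨hp, hcond⟩, hfst⟩ := h
  rw [PySem.List.mem_enumerate_iff] at hp
  obtain ⟨k, hk, rfl⟩ := hp
  simp at hcond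
  exact ⟨k, hk, by simpa using hfst.symm, hcond.1.symm ▸ rfl⟩

theorem wbAvail_append (u byki : List Int) (j v : Int) :
    wbAvail u (byki ++ [j]) v = (wbAvail u byki v).filter (fun x => decide (x ≠ j)) := by
  unfold wbAvail
  rw [List.filter_map, List.filter_filter]
  congr 1
  apply List.filter_congr
  intro p _
  by_cases h1 : p.2 = v <;> by_cases h2 : p.1 ∈ byki <;> by_cases h3 : p.1 = j <;>
    simp [h1, h2, h3, Function.comp]

theorem wbAvail_append_of_ne (u byki : List Int) (x v' j : Int)
    (hj : j ∈ wbAvail u byki x) (hne : v' ≠ x) :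
    wbAvail u (byki ++ [j]) v' = wbAvail u byki v' := by
  rw [wbAvail_append]
  apply List.filter_eq_self.mpr
  intro y hy
  obtain ⟨k, hk, hjk, hval⟩ := wbAvail_val u byki x j hj
  obtain ⟨k', hk', hyk, hval'⟩ := wbAvail_val u byki v' y hy
  simp only [decide_eq_true_eq]
  intro hyj
  apply hne
  have : k' = k := by omega
  subst this
  rw [← hval', hval]

theorem wbAvail_append_self (u byki : List Int) (x j : Int) (rest : List Int)
    (hL : wbAvail u byki x = j :: rest) :
    wbAvail u (byki ++ [j]) x = rest := by
  rw [wbAvail_append, hL]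
  have hnd : (j :: rest).Nodup := hL ▸ wbAvail_nodup u byki x
  rw [List.filter_cons]
  simp only [ne_eq, not_true_eq_false, decide_false, Bool.false_eq_true, if_false]
  apply List.filter_eq_self.mpr
  intro y hy
  simp only [decide_eq_true_eq]
  intro h; subst h
  exact (List.nodup_cons.mp hnd).1 hy

theorem wbPools_fold (z : List Int) (v : Int) (l : List (Int × Int)) (d : PySem.Dict Int (List Int)) :
    (l.foldl (fun d p => if p.1 ∈ PySem.Set.ofList z then d else d.modify p.2 [] (· ++ [p.1])) d).getD v []
      = d.getD v [] ++ (l.filter (fun p => p.2 == v && decide (p.1 ∉ z))).map Prod.fst := by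
  induction l generalizing d with
  | nil => simp
  | cons p rest ih =>
      obtain ⟨j, x⟩ := p
      rw [List.foldl_cons, List.filter_cons, ih]
      by_cases hj : j ∈ z
      · have hm : (j : Int) ∈ PySem.Set.ofList z := (PySem.Set.mem_ofList z j).mpr hj
        simp [hm, hj]
      · have hm : ¬ (j : Int) ∈ PySem.Set.ofList z := fun h => hj ((PySem.Set.mem_ofList z j).mp h)
        rw [if_neg hm]
        by_cases hx : x = v
        · subst hx
          simp [hj, PySem.Dict.getD_modify_self]
        · have hcond : (((j, x).2 == v) && decide ((j, x).1 ∉ z)) = false := by simp [hx]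
          rw [hcond]
          simp only [Bool.false_eq_true, if_false]
          rw [PySem.Dict.getD_modify_of_ne _ _ _ (fun h => hx h.symm)]

theorem wbPools_getD (u z : List Int) (v : Int) :
    (wbPools u (PySem.Set.ofList z)).getD v [] = wbAvail u z v := by
  unfold wbPools wbAvail
  rw [wbPools_fold]
  simp

theorem wb_main (u z : List Int) (w : List Int) (s : Int) (bulls : Int)
    (zajeta byki : List Int) (pools : PySem.Dict Int (List Int))
    (hz : ∀ x : Int, s ≤ x → (x ∈ zajeta ↔ x ∈ z))
    (hp : ∀ v : Int, pools.getD v [] = wbAvail u byki v) :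
    ((PySem.List.enumerate w s).foldl (wbStepA u) (bulls, zajeta, byki)).1
      = ((PySem.List.enumerate w s).foldl (wbStepB (PySem.Set.ofList z)) (bulls, pools)).1 := by
  induction w generalizing s bulls zajeta byki pools with
  | nil => rfl
  | cons x w' ih =>
      rw [PySem.List.enumerate_cons, List.foldl_cons, List.foldl_cons]
      have hsz := hz s le_rfl
      have hmem : (s ∈ PySem.Set.ofList z) ↔ s ∈ z := PySem.Set.mem_ofList z s
      by_cases hs : s ∈ z
      · -- both skip
        have hA : wbStepA u (bulls, zajeta, byki) (s, x) = (bulls, zajeta, byki) := by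
          simp [wbStepA, hsz.mpr hs]
        have hB : wbStepB (PySem.Set.ofList z) (bulls, pools) (s, x) = (bulls, pools) := by
          simp [wbStepB, hmem.mpr hs]
        rw [hA, hB]
        exact ih (s + 1) bulls zajeta byki pools (fun y hy => hz y (by omega)) hp
      · have hAfind : wbFindA s x byki (PySem.List.enumerate u 0)
            = (wbAvail u byki x).find? (fun j => decide (j ≠ s)) :=
          wbFindA_eq_find? s x byki _
        have hz1 : s ∉ zajeta := fun h => hs (hsz.mp h)
        have hm1 : s ∉ PySem.Set.ofList z := fun h => hs (hmem.mp h)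
        match hL : wbAvail u byki x with
        | [] =>
            have hA : wbStepA u (bulls, zajeta, byki) (s, x) = (bulls, zajeta, byki) := by
              simp [wbStepA, hz1, hAfind, hL]
            have hB : wbStepB (PySem.Set.ofList z) (bulls, pools) (s, x) = (bulls, pools) := by
              simp [wbStepB, hm1, hp, hL]
            rw [hA, hB]
            exact ih (s + 1) bulls zajeta byki pools (fun y hy => hz y (by omega)) hp
        | j :: rest =>
            have hnd : (j :: rest).Nodup := hL ▸ wbAvail_nodup u byki x
            have hjmem : j ∈ wbAvail u byki x := by rw [hL]; exact List.mem_cons_self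
            by_cases hjs : j = s
            · match hR : rest with
              | [] =>
                  -- only candidate is s itself: both skip
                  have hA : wbStepA u (bulls, zajeta, byki) (s, x) = (bulls, zajeta, byki) := by
                    simp [wbStepA, hz1, hAfind, hL, hjs]
                  have hB : wbStepB (PySem.Set.ofList z) (bulls, pools) (s, x) = (bulls, pools) := by
                    simp [wbStepB, hm1, hp, hL, hjs]
                  rw [hA, hB]
                  exact ih (s + 1) bulls zajeta byki pools (fun y hy => hz y (by omega)) hp
              | j2 :: rest2 =>
                  have hj2mem : j2 ∈ wbAvail u byki x := by rw [hL]; simp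
                  have hj2j : j2 ≠ j := by
                    intro h; exact (List.nodup_cons.mp hnd).1 (h ▸ List.mem_cons_self)
                  have hj2s : j2 ≠ s := hjs ▸ hj2j
                  have hA : wbStepA u (bulls, zajeta, byki) (s, x)
                      = (bulls + 1, zajeta ++ [s], byki ++ [j2]) := by
                    simp [wbStepA, hz1, hAfind, hL, hjs, hj2s]
                  have hB : wbStepB (PySem.Set.ofList z) (bulls, pools) (s, x)
                      = (bulls + 1, pools.insert x (j :: rest2)) := by
                    simp [wbStepB, hm1, hp, hL, hjs]
                  rw [hA, hB]
                  apply ih (s + 1)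
                  · intro y hy
                    simp only [List.mem_append, List.mem_singleton]
                    constructor
                    · rintro (h | h)
                      · exact (hz y (by omega)).mp h
                      · omega
                    · intro h; exact Or.inl ((hz y (by omega)).mpr h)
                  · intro v'
                    by_cases hv : v' = x
                    · subst hv
                      rw [PySem.Dict.getD_insert_self, wbAvail_append, hL,
                        List.filter_cons, List.filter_cons,
                        if_pos (by simp [Ne.symm hj2j]), if_neg (by simp)]
                      have hnd2 : (j :: j2 :: rest2).Nodup := hnd
                      congr 1
                      symm
                      apply List.filter_eq_self.mpr
                      intro y hy
                      simp only [decide_eq_true_eq]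
                      intro h; subst h
                      exact (List.nodup_cons.mp (List.nodup_cons.mp hnd2).2).1 hy
                    · rw [PySem.Dict.getD_insert_of_ne _ _ _ hv, hp v',
                        wbAvail_append_of_ne u byki x v' j2 hj2mem hv]
            · -- j ≠ s: A takes j, B pops the head
              have hA : wbStepA u (bulls, zajeta, byki) (s, x)
                  = (bulls + 1, zajeta ++ [s], byki ++ [j]) := by
                simp [wbStepA, hz1, hAfind, hL, hjs]
              have hB : wbStepB (PySem.Set.ofList z) (bulls, pools) (s, x)
                  = (bulls + 1, pools.insert x rest) := by
                simp [wbStepB, hm1, hp, hL, hjs]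
              rw [hA, hB]
              apply ih (s + 1)
              · intro y hy
                simp only [List.mem_append, List.mem_singleton]
                constructor
                · rintro (h | h)
                  · exact (hz y (by omega)).mp h
                  · omega
                · intro h; exact Or.inl ((hz y (by omega)).mpr h)
              · intro v'
                by_cases hv : v' = x
                · subst hv
                  rw [PySem.Dict.getD_insert_self]
                  exact (wbAvail_append_self u byki v' j rest hL).symm
                · rw [PySem.Dict.getD_insert_of_ne _ _ _ hv, hp v',
                    wbAvail_append_of_ne u byki x v' j hjmem hv]

-- ===== VERDICT (by name: the statement is the Claim_ definition above) =====
theorem wylicz_byki_spec : Claim_equal_wylicz_byki := by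
  intro w u z _
  unfold Spec_wylicz_byki wylicz_byki wylicz_byki_alt
  exact wb_main u z w 0 0 z z _ (fun x _ => Iff.rfl) (fun v => wbPools_getD u z v)
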